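-- pv_equiv track=rewrite | github.com/IrynLoza/algorithms | matching_a_rule.py | count_mathes
-- ===== SOURCE A (Python) =====
-- def count_mathes(items, ruleKey, ruleValue):
--     """Return the number of items that match the given rule"""
--     key = {
--         'type': 0,
--         'color': 1,
--         'name': 2
--     }
--
--     index = key[ruleKey]
--
--     result = 0
--     for i in range(len(items)):
--         for y in range(len(items[i])):
--             if y == index and ruleValue == items[i][y]:
--                 result+= 1
--     return result
-- ===== SOURCE B (Python) =====
-- def count_mathes(items, ruleKey, ruleValue):
--     """Return the number of items that match the given rule"""
--     index = {'type': 0, 'color': 1, 'name': 2}[ruleKey]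
--     return sum(1 for item in items if index < len(item) and item[index] == ruleValue)
-- ===== Notes on version B (the rewrite author's own statement) =====
-- stated objective: simpler
-- what changed: Replaces the nested index-scanning loops (which walk every cell of every row to find the one column equal to index) with a single pass that directly checks item[index] on each row, guarded by a length test.
import Mathlib
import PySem

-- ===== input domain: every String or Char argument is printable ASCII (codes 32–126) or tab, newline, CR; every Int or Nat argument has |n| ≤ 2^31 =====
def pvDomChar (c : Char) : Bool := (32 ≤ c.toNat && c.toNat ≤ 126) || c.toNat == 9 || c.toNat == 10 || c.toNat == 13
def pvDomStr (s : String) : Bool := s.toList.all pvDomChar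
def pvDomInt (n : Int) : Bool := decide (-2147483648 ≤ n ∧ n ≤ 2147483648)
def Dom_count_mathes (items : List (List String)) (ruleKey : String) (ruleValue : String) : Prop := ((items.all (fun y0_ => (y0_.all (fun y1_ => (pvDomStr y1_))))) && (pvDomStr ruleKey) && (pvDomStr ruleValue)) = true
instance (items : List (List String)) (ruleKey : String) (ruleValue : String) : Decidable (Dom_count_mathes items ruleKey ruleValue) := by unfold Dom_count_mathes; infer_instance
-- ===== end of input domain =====

-- B replaces A's nested loops (which scan every cell of every row looking for the column
-- equal to index) with one direct-index pass over the rows; Pre_ excludes the ruleKeys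
-- on which A raises KeyError.

-- ===== PORT A =====
def count_mathes (items : List (List String)) (ruleKey : String) (ruleValue : String) : Int :=
  let key : PySem.Dict String Int := PySem.Dict.ofList [("type", 0), ("color", 1), ("name", 2)]
  match key.get? ruleKey with
  | none => 0  -- KeyError in Python; excluded by Pre_count_mathes
  | some index =>
      (PySem.List.pyRange 0 (items.length : Int)).foldl (fun result i =>
        (PySem.List.pyRange 0 ((PySem.List.pyGetD items i []).length : Int)).foldl
          (fun result y =>
            if y = index ∧ ruleValue = PySem.List.pyGetD (PySem.List.pyGetD items i []) y ""
            then result + 1 else result)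
          result) 0

-- ===== PORT B =====
def count_mathes_alt (items : List (List String)) (ruleKey : String) (ruleValue : String) : Int :=
  let key : PySem.Dict String Int := PySem.Dict.ofList [("type", 0), ("color", 1), ("name", 2)]
  match key.get? ruleKey with
  | none => 0  -- KeyError in Python; excluded by Pre_count_mathes
  | some index =>
      (items.countP (fun item =>
        decide (index < (item.length : Int) ∧ PySem.List.pyGet? item index = some ruleValue)) : Int)

-- ===== PRECONDITION & SPEC =====
-- Pre_ excludes exactly the ruleKeys absent from the literal dict, on which A raises KeyError.
def Pre_count_mathes (items : List (List String)) (ruleKey : String) (ruleValue : String) : Prop :=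
  ruleKey = "type" ∨ ruleKey = "color" ∨ ruleKey = "name"
instance (items : List (List String)) (ruleKey : String) (ruleValue : String) : Decidable (Pre_count_mathes items ruleKey ruleValue) := by unfold Pre_count_mathes; infer_instance

def pvWitness_count_mathes : List (List String) × String × String :=
  ([["phone", "blue", "pixel"], ["computer", "silver", "lenovo"], ["phone", "gold", "iphone"]], "color", "silver")

def Spec_count_mathes (items : List (List String)) (ruleKey : String) (ruleValue : String) (out : Int) : Prop := out = count_mathes_alt items ruleKey ruleValue
instance (items : List (List String)) (ruleKey : String) (ruleValue : String) (out : Int) : Decidable (Spec_count_mathes items ruleKey ruleValue out) := by unfold Spec_count_mathes; infer_instance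

-- ===== CLAIM (what is proved, stated in full; the proofs are below) =====
def Claim_equal_count_mathes : Prop := ∀ (items : List (List String)) (ruleKey : String) (ruleValue : String), Dom_count_mathes items ruleKey ruleValue → Pre_count_mathes items ruleKey ruleValue → Spec_count_mathes items ruleKey ruleValue (count_mathes items ruleKey ruleValue)

-- ===== LEMMAS AND PROOFS =====

-- A's inner loop over one row adds 1 iff the index-th cell exists and equals ruleValue.
theorem inner_loop_eq (row : List String) (ruleValue : String) (index : Int)
    (hi : 0 ≤ index) (n : Nat) (hn : n ≤ row.length) (acc : Int) :
    (PySem.List.pyRange 0 (n : Int)).foldl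
      (fun result y =>
        if y = index ∧ ruleValue = PySem.List.pyGetD row y "" then result + 1 else result) acc
    = acc + (if index < (n : Int) ∧ PySem.List.pyGet? row index = some ruleValue then 1 else 0) := by
  induction n generalizing acc with
  | zero =>
      have : ¬ (index < (0 : Int)) := by omega
      simp [PySem.List.pyRange, this]
  | succ m ih =>
      have hcast : ((m + 1 : Nat) : Int) = (m : Int) + 1 := by push_cast; ring
      rw [hcast, PySem.List.pyRange_one_succ_right (by positivity), List.foldl_append]
      rw [ih (by omega)]
      simp only [List.foldl_cons, List.foldl_nil]
      by_cases hm : (m : Int) = index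
      · have hnotlt : ¬ index < (m : Int) := by omega
        have hget : PySem.List.pyGet? row index = some row[index.toNat] :=
          PySem.List.pyGet?_eq_some_getElem row hi (by omega)
        have hgetD : PySem.List.pyGetD row (m : Int) "" = row[index.toNat] := by
          rw [hm]; exact PySem.List.pyGetD_eq_getElem row "" hi (by omega)
        rw [hgetD, hget]
        by_cases hv : ruleValue = row[index.toNat]
        · have hlt : index < (m : Int) + 1 := by omega
          simp [hm, hv, hnotlt, hlt]
        · have hne : ¬ (some row[index.toNat] = some ruleValue) := by
            simp; exact fun h => hv h.symm
          simp [hm, hv, hnotlt, hne]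
      · have hiff : (index < (m : Int) + 1 ↔ index < (m : Int)) := by omega
        simp [hm, hiff]

-- Folding A's per-row increments over the rows is B's count.
theorem outer_fold_eq (ruleValue : String) (index : Int) (hi : 0 ≤ index)
    (rows : List (List String)) (acc : Int) :
    rows.foldl
      (fun result row =>
        (PySem.List.pyRange 0 (row.length : Int)).foldl
          (fun result y =>
            if y = index ∧ ruleValue = PySem.List.pyGetD row y "" then result + 1 else result)
          result) acc
    = acc + (rows.countP (fun item =>
        decide (index < (item.length : Int) ∧ PySem.List.pyGet? item index = some ruleValue)) : Int) := by
  induction rows generalizing acc with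
  | nil => simp
  | cons r rs ih =>
      rw [List.foldl_cons, ih, inner_loop_eq r ruleValue index hi r.length le_rfl]
      rw [List.countP_cons]
      by_cases h : index < (r.length : Int) ∧ PySem.List.pyGet? r index = some ruleValue
      · simp [h]; ring
      · simp [h]

-- ===== VERDICT (by name: the statement is the Claim_ definition above) =====
theorem count_mathes_spec : Claim_equal_count_mathes := by
  intro items ruleKey ruleValue _ hpre
  unfold Spec_count_mathes count_mathes count_mathes_alt
  cases hget : (PySem.Dict.ofList [("type", 0), ("color", 1), ("name", 2)] : PySem.Dict String Int).get? ruleKey with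
  | none => simp only [hget]
  | some index =>
      simp only [hget]
      have hi : 0 ≤ index := by
        rcases hpre with h | h | h <;> subst h <;>
          [rw [(by decide : (PySem.Dict.ofList [("type", 0), ("color", 1), ("name", 2)] : PySem.Dict String Int).get? "type" = some 0)] at hget;
           rw [(by decide : (PySem.Dict.ofList [("type", 0), ("color", 1), ("name", 2)] : PySem.Dict String Int).get? "color" = some 1)] at hget;
           rw [(by decide : (PySem.Dict.ofList [("type", 0), ("color", 1), ("name", 2)] : PySem.Dict String Int).get? "name" = some 2)] at hget] <;>
          (cases hget; omega)
      have h1 := PySem.List.foldl_pyRange_pyGetD' items []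
        (fun result row =>
          (PySem.List.pyRange 0 (row.length : Int)).foldl
            (fun result y =>
              if y = index ∧ ruleValue = PySem.List.pyGetD row y "" then result + 1 else result)
            result)
        (0 : Int) (le_refl 0)
      simp only [Int.toNat_zero, List.drop_zero] at h1
      have h2 := outer_fold_eq ruleValue index hi items 0
      rw [zero_add] at h2
      exact h1.trans h2
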